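-- pv_equiv track=rewrite | github.com/mathrabbit1028/MCTS-MVC | data/generate_hack_data.py | generate_greedy_bad_vertex_cover_instance
-- ===== SOURCE A (Python) =====
-- from collections import defaultdict
-- from typing import Any, Dict, List, Set, Tuple, cast
--
-- def generate_greedy_bad_vertex_cover_instance(n: int) -> Tuple[Dict[str, Set[str]], List[str], Dict[int, List[str]]]:
--     """
--     Generate the bipartite graph G_n used to show that max-degree greedy
--     for minimum vertex cover can have Omega(log n) approximation ratio.
--
--     Construction:
--       - Left side L = {L1, ..., Ln}
--       - For each i = 2..n:
--           create floor(n / i) vertices in R_i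
--           each such vertex has degree exactly i
--       - Each left vertex is adjacent to at most one vertex from each R_i
--
--         Returns:
--             graph: dict[str, set[str]]   adjacency list
--             L: list[str]
--             R_groups: dict[int, list[str]]   vertices in each R_i
--     """
--
--     if n < 2:
--         raise ValueError("n must be at least 2")
--
--     L = [f"L{j}" for j in range(n)]
--     graph: Dict[str, Set[str]] = defaultdict(set)
--     R_groups: Dict[int, List[str]] = {}
--
--     # Ensure all left vertices appear in the graph even if isolated
--     for u in L:
--         graph[u]
--
--     for i in range(2, n + 1):
--         cnt = n // i
--         group: List[str] = []
--
--         # Use cyclic windows of length i: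
--         # for the t-th vertex in R_i, connect to
--         # L[t], L[t+1], ..., L[t+i-1] mod n
--         #
--         # This ensures:
--         #   1) each R_i vertex has degree exactly i
--         #   2) each L vertex is used by exactly cnt vertices from R_i
--         #      if cnt = n//i and we only create cnt such windows,
--         #      so in particular each L vertex is not adjacent to
--         #      "too many" R_i vertices.
--         #
--         # If you want the stronger textbook condition
--         # "each L vertex is adjacent to at most one vertex from each R_i",
--         # that can only be satisfied when the chosen i-subsets are disjoint,
--         # which requires cnt * i <= n. Since cnt = floor(n/i), that is true,
--         # and the disjoint-block construction below is even cleaner.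
--         #
--         # So we use disjoint blocks instead of cyclic windows.
--         for t in range(cnt):
--             r = f"R{i}_{t}"
--             group.append(r)
--             graph[r]  # initialize
--
--             # disjoint block of size i
--             neighbors = L[t * i : (t + 1) * i]
--
--             # sanity: this should always have size i
--             if len(neighbors) != i:
--                 raise RuntimeError(
--                     f"Internal construction error for i={i}, t={t}, "
--                     f"expected {i} neighbors, got {len(neighbors)}"
--                 )
--
--             for u in neighbors:
--                 graph[r].add(u)
--                 graph[u].add(r)
--
--         R_groups[i] = group
--
--     return dict(graph), L, R_groups
-- ===== SOURCE B (Python) =====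
-- def generate_greedy_bad_vertex_cover_instance(n):
--     """Same graph, built by closed-form per-vertex adjacency instead of
--     incremental defaultdict mutation: each left vertex's neighbors are
--     located directly by integer division, each right vertex's block is a
--     slice; no set.add / dict growth during edge construction."""
--     if n < 2:
--         raise ValueError("n must be at least 2")
--
--     L = [f"L{j}" for j in range(n)]
--
--     graph = {
--         f"L{j}": {f"R{i}_{j // i}" for i in range(2, n + 1) if j // i < n // i}
--         for j in range(n)
--     }
--     graph.update({
--         f"R{i}_{t}": set(L[t * i:(t + 1) * i])
--         for i in range(2, n + 1)
--         for t in range(n // i)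
--     })
--
--     R_groups = {
--         i: [f"R{i}_{t}" for t in range(n // i)]
--         for i in range(2, n + 1)
--     }
--
--     return graph, L, R_groups
-- ===== Notes on version B (the rewrite author's own statement) =====
-- stated objective: alternative
-- what changed: B computes every adjacency set in closed form (each left vertex L[j] gets {R{i}_{j//i} : j//i < n//i} by integer division, each right vertex R{i}_{t} gets its block slice) and assembles the dicts once by comprehension + update, instead of A's incremental defaultdict mutation that grows sets edge by edge from both endpoints.
import Mathlib
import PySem

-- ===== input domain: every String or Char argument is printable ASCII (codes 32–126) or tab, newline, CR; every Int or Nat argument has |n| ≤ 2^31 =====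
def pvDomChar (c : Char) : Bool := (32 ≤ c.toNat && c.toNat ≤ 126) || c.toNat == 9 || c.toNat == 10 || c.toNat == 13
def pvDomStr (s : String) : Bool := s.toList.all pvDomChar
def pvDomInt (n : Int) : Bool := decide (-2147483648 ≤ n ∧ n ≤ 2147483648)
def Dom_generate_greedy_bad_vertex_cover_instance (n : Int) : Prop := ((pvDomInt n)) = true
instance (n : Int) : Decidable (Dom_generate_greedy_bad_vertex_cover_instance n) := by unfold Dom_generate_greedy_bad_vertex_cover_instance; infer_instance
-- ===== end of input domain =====

-- B builds every adjacency set in closed form (left vertices by integer division, right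
-- vertices by a slice) and assembles the dicts once, instead of A's incremental
-- defaultdict mutation; objective: alternative decomposition, same asymptotic cost.

-- ===== PORT A =====
-- f"L{j}" and f"R{i}_{t}"
def pvLname (j : Int) : String := "L" ++ PySem.Int.toStr j
def pvRname (i t : Int) : String := "R" ++ PySem.Int.toStr i ++ "_" ++ PySem.Int.toStr t

def generate_greedy_bad_vertex_cover_instance (n : Int) :
    (List (String × List String)) × List String × (List (Int × List String)) :=
  if n < 2 then ([], [], [])  -- Python: raise ValueError("n must be at least 2"); excluded by Pre_
  else
    let L : List String := (PySem.List.pyRange 0 n).map (fun j => pvLname j)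
    -- for u in L: graph[u]   (touching a defaultdict(set) key stores an empty set)
    let graph0 : PySem.Dict String (PySem.Set String) :=
      L.foldl (fun g u => g.modify u PySem.Set.empty id) PySem.Dict.empty
    let st :=
      (PySem.List.pyRange 2 (n+1)).foldl
        (fun (st : PySem.Dict String (PySem.Set String) × PySem.Dict Int (List String)) i =>
          let cnt := PySem.Int.floordiv n i
          let inner :=
            (PySem.List.pyRange 0 cnt).foldl
              (fun (st2 : PySem.Dict String (PySem.Set String) × List String) t =>
                let r := pvRname i t
                let group := st2.2 ++ [r]
                let g := st2.1.modify r PySem.Set.empty id   -- graph[r]  # initialize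
                let neighbors := PySem.List.slice L (some (t*i)) (some ((t+1)*i))
                if PySem.List.len neighbors ≠ i then
                  (g, group)  -- Python: raise RuntimeError(...); provably unreachable here
                else
                  (neighbors.foldl (fun g2 u =>
                      (g2.modify r PySem.Set.empty (fun s => PySem.Set.add s u)).modify u
                        PySem.Set.empty (fun s => PySem.Set.add s r)) g,
                   group)) (st.1, ([] : List String))
          (inner.1, st.2.insert i inner.2))
        (graph0, (PySem.Dict.empty : PySem.Dict Int (List String)))
    (st.1.items, L, st.2.items)

-- ===== PORT B =====
def generate_greedy_bad_vertex_cover_instance_alt (n : Int) :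
    (List (String × List String)) × List String × (List (Int × List String)) :=
  if n < 2 then ([], [], [])  -- raise ValueError("n must be at least 2"); excluded by Pre_
  else
    let L : List String := (PySem.List.pyRange 0 n).map (fun j => pvLname j)
    let leftPairs : List (String × List String) :=
      (PySem.List.pyRange 0 n).map (fun j =>
        (pvLname j,
         PySem.Set.ofList (((PySem.List.pyRange 2 (n+1)).filter
             (fun i => decide (PySem.Int.floordiv j i < PySem.Int.floordiv n i))).map
           (fun i => pvRname i (PySem.Int.floordiv j i)))))
    let rightPairs : List (String × List String) :=
      (PySem.List.pyRange 2 (n+1)).flatMap (fun i =>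
        (PySem.List.pyRange 0 (PySem.Int.floordiv n i)).map (fun t =>
          (pvRname i t, PySem.Set.ofList (PySem.List.slice L (some (t*i)) (some ((t+1)*i))))))
    let graph := (PySem.Dict.ofList leftPairs).update rightPairs   -- dict comprehension + .update
    let rgroups : PySem.Dict Int (List String) :=
      PySem.Dict.ofList ((PySem.List.pyRange 2 (n+1)).map (fun i =>
        (i, (PySem.List.pyRange 0 (PySem.Int.floordiv n i)).map (fun t => pvRname i t))))
    (graph.items, L, rgroups.items)

-- ===== PRECONDITION & SPEC =====
-- Pre_ excludes exactly n < 2, where the Python A raises ValueError.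
def Pre_generate_greedy_bad_vertex_cover_instance (n : Int) : Prop := 2 ≤ n
instance (n : Int) : Decidable (Pre_generate_greedy_bad_vertex_cover_instance n) := by unfold Pre_generate_greedy_bad_vertex_cover_instance; infer_instance
def pvWitness_generate_greedy_bad_vertex_cover_instance : Int := 4

def Spec_generate_greedy_bad_vertex_cover_instance (n : Int) (out : (List (String × List String)) × List String × (List (Int × List String))) : Prop := out = generate_greedy_bad_vertex_cover_instance_alt n
instance (n : Int) (out : (List (String × List String)) × List String × (List (Int × List String))) : Decidable (Spec_generate_greedy_bad_vertex_cover_instance n out) := by unfold Spec_generate_greedy_bad_vertex_cover_instance; infer_instance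

-- ===== CLAIM (what is proved, stated in full; the proofs are below) =====
def Claim_equal_generate_greedy_bad_vertex_cover_instance : Prop := ∀ (n : Int), Dom_generate_greedy_bad_vertex_cover_instance n → Pre_generate_greedy_bad_vertex_cover_instance n → Spec_generate_greedy_bad_vertex_cover_instance n (generate_greedy_bad_vertex_cover_instance n)

-- ===== LEMMAS AND PROOFS =====

lemma pv_toDigits_val (nn : Nat) : ∀ a : Nat,
    (Nat.toDigits 10 nn).foldl (fun acc c => 10 * acc + (c.toNat - 48)) a
      = a * 10 ^ (Nat.toDigits 10 nn).length + nn := by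
  induction nn using Nat.strong_induction_on with
  | _ nn ih =>
    intro a
    have hdc : ∀ d : Nat, d < 10 → (Nat.digitChar d).toNat - 48 = d := by
      intro d hd; interval_cases d <;> rfl
    by_cases h : nn < 10
    · rw [Nat.toDigits_of_lt_base h]
      simp [List.foldl, hdc nn h]
      ring
    · rw [Nat.not_lt] at h
      have h1 : 0 < nn / 10 := Nat.div_pos h (by norm_num)
      have h2 : nn % 10 < 10 := Nat.mod_lt _ (by norm_num)
      have key := Nat.toDigits_append_toDigits (b := 10) (n := nn/10) (d := nn % 10)
        (by norm_num) h1 h2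
      have hnn : 10 * (nn / 10) + nn % 10 = nn := by omega
      rw [hnn] at key
      rw [← key, List.foldl_append, List.length_append, ih (nn/10) (by omega) a,
        Nat.toDigits_of_lt_base h2]
      simp only [List.foldl, List.length_cons, List.length_nil, hdc _ h2]
      rw [pow_succ, ← mul_assoc]
      set X := a * 10 ^ (Nat.toDigits 10 (nn/10)).length with hX
      omega

lemma pv_toDigits_inj {a b : Nat} (h : Nat.toDigits 10 a = Nat.toDigits 10 b) : a = b := by
  have ha := pv_toDigits_val a 0
  have hb := pv_toDigits_val b 0
  rw [h] at ha
  omega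

lemma pv_toChars_nonneg {j : Int} (h : 0 ≤ j) :
    PySem.Int.toChars j = Nat.toDigits 10 j.toNat := by
  rw [PySem.Int.toChars, if_neg (by omega)]

lemma pv_toChars_inj {a b : Int} (ha : 0 ≤ a) (hb : 0 ≤ b)
    (h : PySem.Int.toChars a = PySem.Int.toChars b) : a = b := by
  rw [pv_toChars_nonneg ha, pv_toChars_nonneg hb] at h
  have := pv_toDigits_inj h
  omega

lemma pv_toChars_digits {c : Char} {j : Int} (hj : 0 ≤ j) (h : c ∈ PySem.Int.toChars j) :
    c.isDigit = true := by
  rw [pv_toChars_nonneg hj] at h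
  exact Nat.isDigit_of_mem_toDigits (by norm_num) (by norm_num) h

lemma pv_toList_Lname (j : Int) : (pvLname j).toList = 'L' :: PySem.Int.toChars j := by
  simp [pvLname, String.toList_append, PySem.Int.toList_toStr]

lemma pv_toList_Rname (i t : Int) :
    (pvRname i t).toList = 'R' :: (PySem.Int.toChars i ++ '_' :: PySem.Int.toChars t) := by
  simp [pvRname, String.toList_append, PySem.Int.toList_toStr]

lemma pv_Lname_inj {a b : Int} (ha : 0 ≤ a) (hb : 0 ≤ b) (h : pvLname a = pvLname b) : a = b := by
  have h' := congrArg String.toList h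
  rw [pv_toList_Lname, pv_toList_Lname] at h'
  exact pv_toChars_inj ha hb (by simpa using h')

lemma pv_Lname_ne_Rname (j i t : Int) : pvLname j ≠ pvRname i t := by
  intro h
  have h' := congrArg String.toList h
  rw [pv_toList_Lname, pv_toList_Rname] at h'
  simp at h'

lemma pv_split_underscore : ∀ (A A' B B' : List Char), (∀ c ∈ A, c.isDigit = true) →
    (∀ c ∈ A', c.isDigit = true) → A ++ '_' :: B = A' ++ '_' :: B' → A = A' ∧ B = B' := by
  intro A
  induction A with
  | nil =>
    intro A' B B' _ hA' h
    cases A' with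
    | nil => simpa using h
    | cons c A2 =>
      simp only [List.nil_append, List.cons_append, List.cons.injEq] at h
      have := hA' c (by simp)
      rw [← h.1] at this
      simp at this
  | cons c A2 ih =>
    intro A' B B' hA hA' h
    cases A' with
    | nil =>
      simp only [List.nil_append, List.cons_append, List.cons.injEq] at h
      have := hA c (by simp)
      rw [h.1] at this
      simp at this
    | cons c' A2' =>
      simp only [List.cons_append, List.cons.injEq] at h
      obtain ⟨h1, h2⟩ := h
      obtain ⟨hAA, hBB⟩ := ih A2' B B' (fun x hx => hA x (by simp [hx]))
        (fun x hx => hA' x (by simp [hx])) h2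
      exact ⟨by simp [h1, hAA], hBB⟩

lemma pv_Rname_inj {i t i' t' : Int} (hi : 0 ≤ i) (ht : 0 ≤ t) (hi' : 0 ≤ i') (ht' : 0 ≤ t')
    (h : pvRname i t = pvRname i' t') : i = i' ∧ t = t' := by
  have h' := congrArg String.toList h
  rw [pv_toList_Rname, pv_toList_Rname] at h'
  simp only [List.cons.injEq, true_and] at h'
  obtain ⟨hA, hB⟩ := pv_split_underscore _ _ _ _
    (fun c hc => pv_toChars_digits hi hc) (fun c hc => pv_toChars_digits hi' hc) h'
  exact ⟨pv_toChars_inj hi hi' hA, pv_toChars_inj ht ht' hB⟩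

lemma pv_contains_false {κ ν : Type} [BEq κ] [LawfulBEq κ] (d : PySem.Dict κ ν) (k : κ)
    (h : ∀ p ∈ d.items, p.1 ≠ k) : d.contains k = false := by
  rw [PySem.Dict.contains]
  rw [List.any_eq_false]
  intro p hp
  simpa using h p hp

lemma pv_modify_absent {κ ν : Type} [BEq κ] [LawfulBEq κ] (d : PySem.Dict κ ν) (k : κ)
    (dflt : ν) (f : ν → ν) (h : ∀ p ∈ d.items, p.1 ≠ k) :
    (d.modify k dflt f).items = d.items ++ [(k, f dflt)] := by
  have hc := pv_contains_false d k h
  rw [PySem.Dict.modify, PySem.Dict.items_insert_of_not_contains _ _ hc,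
    PySem.Dict.getD_of_not_contains _ _ hc]

lemma pv_modify_present {κ ν : Type} [BEq κ] [LawfulBEq κ] (d : PySem.Dict κ ν)
    (X Y : List (κ × ν)) (k : κ) (v : ν) (dflt : ν) (f : ν → ν)
    (hitems : d.items = X ++ (k, v) :: Y)
    (hX : ∀ p ∈ X, p.1 ≠ k) (hY : ∀ p ∈ Y, p.1 ≠ k) :
    (d.modify k dflt f).items = X ++ (k, f v) :: Y := by
  have hc : d.contains k = true := by
    rw [PySem.Dict.contains, List.any_eq_true]
    exact ⟨(k, v), by rw [hitems]; simp, by simp⟩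
  have hget : d.getD k dflt = v := by
    rw [PySem.Dict.getD_eq_get?_getD, PySem.Dict.get?, hitems, List.find?_append]
    have h1 : List.find? (fun p => p.1 == k) X = none := by
      rw [List.find?_eq_none]
      intro p hp; simpa using hX p hp
    rw [h1, Option.none_or, List.find?_cons_of_pos (by simp)]
    rfl
  rw [PySem.Dict.modify, PySem.Dict.items_insert_of_contains _ _ hc, hget, hitems]
  rw [List.map_append, List.map_cons]
  congr 1
  · have : List.map (fun p => if (p.1 == k) = true then (k, f v) else p) X = List.map id X :=
      List.map_congr_left (fun p hp => by simp [beq_iff_eq, hX p hp])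
    rw [this, List.map_id]
  · simp only [BEq.rfl, if_pos]
    congr 1
    have : List.map (fun p => if (p.1 == k) = true then (k, f v) else p) Y = List.map id Y :=
      List.map_congr_left (fun p hp => by simp [beq_iff_eq, hY p hp])
    rw [this, List.map_id]

lemma pv_update_fresh {κ ν : Type} [BEq κ] [LawfulBEq κ] : ∀ (ps : List (κ × ν)) (d : PySem.Dict κ ν),
    (∀ p ∈ ps, ∀ q ∈ d.items, q.1 ≠ p.1) → (ps.map Prod.fst).Nodup →
    (d.update ps).items = d.items ++ ps := by
  intro ps
  induction ps with
  | nil => intro d _ _; simp [PySem.Dict.update]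
  | cons p ps ih =>
    intro d hfresh hnd
    have hc : d.contains p.1 = false :=
      pv_contains_false d p.1 (fun q hq => hfresh p (by simp) q hq)
    have hstep : (d.insert p.1 p.2).items = d.items ++ [p] := by
      rw [PySem.Dict.items_insert_of_not_contains _ _ hc]
    rw [PySem.Dict.update, List.foldl_cons]
    have := ih (d.insert p.1 p.2) (fun q hq r hr => by
      rw [hstep] at hr
      rcases List.mem_append.mp hr with hr | hr
      · exact hfresh q (by simp [hq]) r hr
      · simp only [List.mem_singleton] at hr
        subst hr
        simp only [List.map_cons, List.nodup_cons] at hnd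
        intro hcon
        exact hnd.1 (hcon ▸ List.mem_map_of_mem hq)) (by
        simp only [List.map_cons, List.nodup_cons] at hnd
        exact hnd.2)
    rw [PySem.Dict.update] at this
    rw [this, hstep]
    simp


def pvLeftList (n m j : Int) : List String :=
  ((PySem.List.pyRange 2 m).filter
      (fun i => decide (PySem.Int.floordiv j i < PySem.Int.floordiv n i))).map
    (fun i => pvRname i (PySem.Int.floordiv j i))
def pvLentry (n m w j : Int) : String × List String :=
  (pvLname j, pvLeftList n m j ++ if j < w then [pvRname m (PySem.Int.floordiv j m)] else [])
def pvLeft (n m w : Int) : List (String × List String) :=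
  (PySem.List.pyRange 0 n).map (pvLentry n m w)
def pvLeft0 (n m : Int) : List (String × List String) :=
  (PySem.List.pyRange 0 n).map (fun j => (pvLname j, pvLeftList n m j))
def pvBlock (a b : Int) : List String := (PySem.List.pyRange a b).map (fun j => pvLname j)
def pvRow (n i : Int) : List (String × List String) :=
  (PySem.List.pyRange 0 (PySem.Int.floordiv n i)).map
    (fun t => (pvRname i t, pvBlock (t*i) ((t+1)*i)))
def pvRight (n m : Int) : List (String × List String) :=
  (PySem.List.pyRange 2 m).flatMap (pvRow n)
def pvRowPre (m s : Int) : List (String × List String) :=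
  (PySem.List.pyRange 0 s).map (fun t => (pvRname m t, pvBlock (t*m) ((t+1)*m)))
def pvRG (n m : Int) : List (Int × List String) :=
  (PySem.List.pyRange 2 m).map (fun i =>
    (i, (PySem.List.pyRange 0 (PySem.Int.floordiv n i)).map (fun t => pvRname i t)))

-- arithmetic
lemma pv_cnt_nonneg {n m : Int} (hn : 0 ≤ n) (hm : 0 < m) : 0 ≤ PySem.Int.floordiv n m :=
  (PySem.Int.le_floordiv_iff_mul_le hm).mpr (by omega)

lemma pv_cnt_mul_le {n m : Int} (hm : 0 < m) : PySem.Int.floordiv n m * m ≤ n := by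
  have h1 := PySem.Int.floordiv_mul_add_mod n m
  have h2 := PySem.Int.mod_nonneg n hm
  omega

-- slice of L is a block
lemma pv_slice (n a b : Int) (h0 : 0 ≤ a) (hab : a ≤ b) (hbn : b ≤ n) :
    PySem.List.slice ((PySem.List.pyRange 0 n).map (fun j => pvLname j)) (some a) (some b)
      = pvBlock a b := by
  have hn : 0 ≤ n := le_trans (le_trans h0 hab) hbn
  have hlen : ((PySem.List.pyRange 0 n).map (fun j => pvLname j)).length = n.toNat := by
    simp [PySem.List.length_pyRange_one]
  rw [PySem.List.slice_of_nonneg _ h0 (by omega) (by omega) (by omega)]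
  rw [PySem.List.pyRange_one_append 0 a n h0 (by omega),
    PySem.List.pyRange_one_append a b n hab hbn, List.map_append, List.map_append]
  have hla : ((PySem.List.pyRange 0 a).map (fun j => pvLname j)).length = a.toNat := by
    simp [PySem.List.length_pyRange_one]
  rw [List.drop_left' hla]
  have hlb : ((PySem.List.pyRange a b).map (fun j => pvLname j)).length = b.toNat - a.toNat := by
    simp [PySem.List.length_pyRange_one]; omega
  rw [List.take_left' hlb]
  rfl

-- key shapes
lemma pv_left_key {n m w : Int} {p : String × List String} (hp : p ∈ pvLeft n m w) :
    ∃ j, 0 ≤ j ∧ j < n ∧ p.1 = pvLname j := by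
  obtain ⟨j, hj, rfl⟩ := List.mem_map.mp hp
  obtain ⟨h1, h2⟩ := PySem.List.mem_pyRange_one.mp hj
  exact ⟨j, h1, h2, rfl⟩

lemma pv_right_key {n m : Int} {p : String × List String} (hp : p ∈ pvRight n m) :
    ∃ i t, 2 ≤ i ∧ i < m ∧ 0 ≤ t ∧ p.1 = pvRname i t := by
  obtain ⟨i, hi, hp2⟩ := List.mem_flatMap.mp hp
  obtain ⟨hi1, hi2⟩ := PySem.List.mem_pyRange_one.mp hi
  obtain ⟨t, ht, rfl⟩ := List.mem_map.mp hp2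
  obtain ⟨ht1, _⟩ := PySem.List.mem_pyRange_one.mp ht
  exact ⟨i, t, hi1, hi2, ht1, rfl⟩

lemma pv_rowpre_key {m s : Int} {p : String × List String} (hp : p ∈ pvRowPre m s) :
    ∃ t, 0 ≤ t ∧ t < s ∧ p.1 = pvRname m t := by
  obtain ⟨t, ht, rfl⟩ := List.mem_map.mp hp
  obtain ⟨ht1, ht2⟩ := PySem.List.mem_pyRange_one.mp ht
  exact ⟨t, ht1, ht2, rfl⟩

-- r = pvRname m s is fresh for the three prefixes
lemma pv_fresh_r {n m s w : Int} (hm : 2 ≤ m) (hs : 0 ≤ s) :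
    ∀ p ∈ pvLeft n m w ++ pvRight n m ++ pvRowPre m s, p.1 ≠ pvRname m s := by
  intro p hp
  rcases List.mem_append.mp hp with hp' | hp'
  · rcases List.mem_append.mp hp' with hp'' | hp''
    · obtain ⟨j, _, _, hkey⟩ := pv_left_key hp''
      rw [hkey]; exact pv_Lname_ne_Rname j m s
    · obtain ⟨i, t, hi1, hi2, ht1, hkey⟩ := pv_right_key hp''
      rw [hkey]
      intro hcon
      obtain ⟨h1, _⟩ := pv_Rname_inj (by omega) ht1 (by omega) hs hcon
      omega
  · obtain ⟨t, ht1, ht2, hkey⟩ := pv_rowpre_key hp'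
    rw [hkey]
    intro hcon
    obtain ⟨_, h2⟩ := pv_Rname_inj (by omega) ht1 (by omega) hs hcon
    omega

-- pvLname w is distinct from every right-side key
lemma pv_lname_ne_right {n m w : Int} {p : String × List String}
    (hp : p ∈ pvRight n m) : p.1 ≠ pvLname w := by
  obtain ⟨i, t, _, _, _, hkey⟩ := pv_right_key hp
  rw [hkey]; exact fun h => pv_Lname_ne_Rname w i t h.symm

lemma pv_lname_ne_rowpre {m s w : Int} {p : String × List String}
    (hp : p ∈ pvRowPre m s) : p.1 ≠ pvLname w := by
  obtain ⟨t, _, _, hkey⟩ := pv_rowpre_key hp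
  rw [hkey]; exact fun h => pv_Lname_ne_Rname w m t h.symm

-- left-part splitting and congruence
lemma pv_left_split (n m w j0 : Int) (h0 : 0 ≤ j0) (hw : j0 < n) :
    pvLeft n m w = (PySem.List.pyRange 0 j0).map (pvLentry n m w)
      ++ pvLentry n m w j0 :: (PySem.List.pyRange (j0+1) n).map (pvLentry n m w) := by
  rw [pvLeft, PySem.List.pyRange_one_append 0 j0 n h0 (by omega),
    PySem.List.pyRange_one_cons (show j0 < n by omega), List.map_append, List.map_cons]

lemma pv_left_congr_lo (n m w w' : Int) (hw : w ≤ w') :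
    (PySem.List.pyRange 0 w).map (pvLentry n m w) = (PySem.List.pyRange 0 w).map (pvLentry n m w') :=
  List.map_congr_left (fun j hj => by
    obtain ⟨_, h2⟩ := PySem.List.mem_pyRange_one.mp hj
    rw [pvLentry, pvLentry, if_pos h2, if_pos (by omega)])

lemma pv_left_congr_hi (n m w : Int) :
    (PySem.List.pyRange (w+1) n).map (pvLentry n m w)
      = (PySem.List.pyRange (w+1) n).map (pvLentry n m (w+1)) :=
  List.map_congr_left (fun j hj => by
    obtain ⟨h1, _⟩ := PySem.List.mem_pyRange_one.mp hj
    rw [pvLentry, pvLentry, if_neg (by omega), if_neg (by omega)])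

lemma pv_left_zero (n m : Int) : pvLeft n m 0 = pvLeft0 n m :=
  List.map_congr_left (fun j hj => by
    obtain ⟨h1, _⟩ := PySem.List.mem_pyRange_one.mp hj
    rw [pvLentry, if_neg (by omega), List.append_nil])

lemma pv_left_end (n m : Int) (hm : 2 ≤ m) :
    pvLeft n m (PySem.Int.floordiv n m * m) = pvLeft0 n (m+1) :=
  List.map_congr_left (fun j hj => by
    obtain ⟨h1, _⟩ := PySem.List.mem_pyRange_one.mp hj
    rw [pvLentry, pvLeftList, pvLeftList,
      PySem.List.pyRange_one_succ_right (show (2:Int) ≤ m by omega), List.filter_append,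
      List.map_append]
    congr 1
    by_cases hc : PySem.Int.floordiv j m < PySem.Int.floordiv n m
    · rw [if_pos ((PySem.Int.floordiv_lt_iff_lt_mul (by omega)).mp hc)]
      simp [hc]
    · rw [if_neg (fun hlt => hc ((PySem.Int.floordiv_lt_iff_lt_mul (by omega)).mpr hlt))]
      simp [hc])

lemma pv_fold_neighbors (n m s : Int) (hm : 2 ≤ m) (hs : 0 ≤ s)
    (hsc : s < PySem.Int.floordiv n m) :
    ∀ (k : Nat) (w : Int) (g : PySem.Dict String (PySem.Set String)),
    ((s+1) * m - w).toNat = k → s * m ≤ w → w ≤ (s+1) * m →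
    g.items = pvLeft n m w ++ pvRight n m ++ pvRowPre m s ++ [(pvRname m s, pvBlock (s*m) w)] →
    ((pvBlock w ((s+1)*m)).foldl (fun g2 u =>
        (g2.modify (pvRname m s) PySem.Set.empty (fun st => PySem.Set.add st u)).modify u
          PySem.Set.empty (fun st => PySem.Set.add st (pvRname m s))) g).items
      = pvLeft n m ((s+1)*m) ++ pvRight n m ++ pvRowPre m s
        ++ [(pvRname m s, pvBlock (s*m) ((s+1)*m))] := by
  intro k
  induction k with
  | zero =>
    intro w g hk hw1 hw2 hitems
    have hw : w = (s+1)*m := by omega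
    subst hw
    rw [pvBlock, PySem.List.pyRange_one_eq_nil (le_refl _), List.map_nil, List.foldl_nil]
    exact hitems
  | succ k ih =>
    intro w g hk hw1 hw2 hitems
    have hwlt : w < (s+1)*m := by omega
    have hsm : 0 ≤ s * m := mul_nonneg hs (by omega)
    have hw0 : 0 ≤ w := le_trans hsm hw1
    have hcm : (s+1) * m ≤ PySem.Int.floordiv n m * m :=
      mul_le_mul_of_nonneg_right (by omega) (by omega)
    have hwn : w < n := lt_of_lt_of_le hwlt (le_trans hcm (pv_cnt_mul_le (by omega)))
    have hfw : PySem.Int.floordiv w m = s := by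
      rw [PySem.Int.floordiv_eq_iff_of_pos (by omega)]
      exact ⟨hw1, hwlt⟩
    rw [pvBlock, PySem.List.pyRange_one_cons hwlt, List.map_cons, List.foldl_cons]
    -- step 1: add u to graph[r] (r is the final entry)
    have hufresh : pvLname w ∉ pvBlock (s*m) w := by
      intro hmem
      obtain ⟨j, hj, hje⟩ := List.mem_map.mp hmem
      obtain ⟨hj1, hj2⟩ := PySem.List.mem_pyRange_one.mp hj
      have := pv_Lname_inj (by omega) hw0 hje
      omega
    have hval1 : PySem.Set.add (pvBlock (s*m) w) (pvLname w) = pvBlock (s*m) (w+1) := by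
      rw [PySem.Set.add_of_not_mem hufresh, pvBlock, pvBlock,
        PySem.List.pyRange_one_succ_right hw1, List.map_append]
      rfl
    have h1 : (g.modify (pvRname m s) PySem.Set.empty
          (fun st => PySem.Set.add st (pvLname w))).items
        = pvLeft n m w ++ pvRight n m ++ pvRowPre m s
          ++ [(pvRname m s, pvBlock (s*m) (w+1))] := by
      have hmp := pv_modify_present g (pvLeft n m w ++ pvRight n m ++ pvRowPre m s) []
        (pvRname m s) (pvBlock (s*m) w) PySem.Set.empty (fun st => PySem.Set.add st (pvLname w))
        (by rw [hitems]) (pv_fresh_r hm hs) (by simp)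
      beta_reduce at hmp
      rw [hmp, hval1]
    -- step 2: add r to graph[u] (u sits in the left block at position w)
    have hrfresh : pvRname m s ∉ pvLeftList n m w ++ ([] : List String) := by
      rw [List.append_nil]
      intro hmem
      obtain ⟨i, hi, hie⟩ := List.mem_map.mp hmem
      have hi' := (List.mem_filter.mp hi).1
      obtain ⟨hi1, hi2⟩ := PySem.List.mem_pyRange_one.mp hi'
      have hfd : 0 ≤ PySem.Int.floordiv w i := pv_cnt_nonneg hw0 (by omega)
      obtain ⟨he1, _⟩ := pv_Rname_inj (by omega) hfd (by omega) hs hie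
      omega
    have hval2 : PySem.Set.add (pvLeftList n m w ++ []) (pvRname m s)
        = pvLeftList n m w ++ [pvRname m (PySem.Int.floordiv w m)] := by
      rw [PySem.Set.add_of_not_mem hrfresh, hfw]
      simp
    have hentry : pvLentry n m w w = (pvLname w, pvLeftList n m w ++ []) := by
      rw [pvLentry, if_neg (by omega)]
    have h2 : ((g.modify (pvRname m s) PySem.Set.empty
            (fun st => PySem.Set.add st (pvLname w))).modify (pvLname w) PySem.Set.empty
          (fun st => PySem.Set.add st (pvRname m s))).items
        = pvLeft n m (w+1) ++ pvRight n m ++ pvRowPre m s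
          ++ [(pvRname m s, pvBlock (s*m) (w+1))] := by
      have hmp := pv_modify_present
        (d := (g.modify (pvRname m s) PySem.Set.empty (fun st => PySem.Set.add st (pvLname w))))
        ((PySem.List.pyRange 0 w).map (pvLentry n m w))
        ((PySem.List.pyRange (w+1) n).map (pvLentry n m w) ++ pvRight n m ++ pvRowPre m s
          ++ [(pvRname m s, pvBlock (s*m) (w+1))])
        (pvLname w) (pvLeftList n m w ++ []) PySem.Set.empty
        (fun st => PySem.Set.add st (pvRname m s))
        (by rw [h1, pv_left_split n m w w hw0 hwn, hentry]; simp [List.append_assoc])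
        (by
          intro p hp
          obtain ⟨j, hj, rfl⟩ := List.mem_map.mp hp
          obtain ⟨hj1, hj2⟩ := PySem.List.mem_pyRange_one.mp hj
          rw [pvLentry]
          intro hcon
          have := pv_Lname_inj hj1 hw0 hcon
          omega)
        (by
          intro p hp
          rcases List.mem_append.mp hp with hp' | hp'
          · rcases List.mem_append.mp hp' with hp'' | hp''
            · rcases List.mem_append.mp hp'' with hp3 | hp3
              · obtain ⟨j, hj, rfl⟩ := List.mem_map.mp hp3
                obtain ⟨hj1, hj2⟩ := PySem.List.mem_pyRange_one.mp hj
                rw [pvLentry]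
                intro hcon
                have := pv_Lname_inj (by omega) hw0 hcon
                omega
              · exact pv_lname_ne_right hp3
            · exact pv_lname_ne_rowpre hp''
          · simp only [List.mem_singleton] at hp'
            subst hp'
            exact fun h => pv_Lname_ne_Rname w m s h.symm)
      beta_reduce at hmp
      rw [hmp, hval2]
      rw [pv_left_split n m (w+1) w hw0 hwn,
        pv_left_congr_lo n m w (w+1) (by omega), pv_left_congr_hi n m w]
      have : pvLentry n m (w+1) w = (pvLname w, pvLeftList n m w ++ [pvRname m (PySem.Int.floordiv w m)]) := by
        rw [pvLentry, if_pos (by omega)]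
      rw [this]
      simp [List.append_assoc]
    exact ih (w+1) _ (by omega) (by omega) (by omega) h2

def pvBodyT (n m : Int) (st2 : PySem.Dict String (PySem.Set String) × List String) (t : Int) :
    PySem.Dict String (PySem.Set String) × List String :=
  let r := pvRname m t
  let group := st2.2 ++ [r]
  let g := st2.1.modify r PySem.Set.empty id
  let neighbors := PySem.List.slice ((PySem.List.pyRange 0 n).map (fun j => pvLname j))
    (some (t*m)) (some ((t+1)*m))
  if PySem.List.len neighbors ≠ m then
    (g, group)
  else
    (neighbors.foldl (fun g2 u =>
        (g2.modify r PySem.Set.empty (fun st => PySem.Set.add st u)).modify u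
          PySem.Set.empty (fun st => PySem.Set.add st r)) g,
     group)

lemma pv_fold_t (n m : Int) (hm : 2 ≤ m) :
    ∀ (k : Nat) (s : Int) (g : PySem.Dict String (PySem.Set String)) (group : List String),
    (PySem.Int.floordiv n m - s).toNat = k → 0 ≤ s → s ≤ PySem.Int.floordiv n m →
    g.items = pvLeft n m (s*m) ++ pvRight n m ++ pvRowPre m s →
    group = (PySem.List.pyRange 0 s).map (fun t => pvRname m t) →
    ((PySem.List.pyRange s (PySem.Int.floordiv n m)).foldl (pvBodyT n m) (g, group)).1.items
        = pvLeft n m (PySem.Int.floordiv n m * m) ++ pvRight n m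
          ++ pvRowPre m (PySem.Int.floordiv n m)
      ∧ ((PySem.List.pyRange s (PySem.Int.floordiv n m)).foldl (pvBodyT n m) (g, group)).2
        = (PySem.List.pyRange 0 (PySem.Int.floordiv n m)).map (fun t => pvRname m t)
:= by
  intro k
  induction k with
  | zero =>
    intro s g group hk hs1 hs2 hitems hgroup
    have hs : s = PySem.Int.floordiv n m := by omega
    subst hs
    rw [PySem.List.pyRange_one_eq_nil (le_refl _), List.foldl_nil]
    exact ⟨by rw [hitems], by rw [hgroup]⟩
  | succ k ih =>
    intro s g group hk hs1 hs2 hitems hgroup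
    have hslt : s < PySem.Int.floordiv n m := by omega
    have hm0 : (0:Int) < m := by omega
    have hcm : (s+1) * m ≤ PySem.Int.floordiv n m * m :=
      mul_le_mul_of_nonneg_right (by omega) (by omega)
    have hnm : PySem.Int.floordiv n m * m ≤ n := pv_cnt_mul_le hm0
    have hsm : 0 ≤ s * m := mul_nonneg hs1 (by omega)
    have hsm1 : s * m ≤ (s+1) * m := mul_le_mul_of_nonneg_right (by omega) (by omega)
    rw [PySem.List.pyRange_one_cons hslt, List.foldl_cons]
    -- the body applied once
    have hslice : PySem.List.slice ((PySem.List.pyRange 0 n).map (fun j => pvLname j))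
        (some (s*m)) (some ((s+1)*m)) = pvBlock (s*m) ((s+1)*m) :=
      pv_slice n (s*m) ((s+1)*m) hsm hsm1 (le_trans hcm hnm)
    have hlen : PySem.List.len (pvBlock (s*m) ((s+1)*m)) = m := by
      rw [PySem.List.len_eq, pvBlock, List.length_map, PySem.List.length_pyRange_one]
      have h1 : (s+1) * m - s * m = m := by ring
      rw [h1]
      omega
    have habs : (g.modify (pvRname m s) PySem.Set.empty id).items
        = pvLeft n m (s*m) ++ pvRight n m ++ pvRowPre m s
          ++ [(pvRname m s, pvBlock (s*m) (s*m))] := by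
      rw [pv_modify_absent g (pvRname m s) PySem.Set.empty id
        (by rw [hitems]; exact pv_fresh_r hm hs1), hitems]
      rw [pvBlock, PySem.List.pyRange_one_eq_nil (le_refl _), List.map_nil]
      rfl
    have hstep := pv_fold_neighbors n m s hm hs1 hslt ((s+1)*m - s*m).toNat (s*m)
      (g.modify (pvRname m s) PySem.Set.empty id) rfl (le_refl _) hsm1 habs
    have hrow : pvRowPre m s ++ [(pvRname m s, pvBlock (s*m) ((s+1)*m))] = pvRowPre m (s+1) := by
      rw [pvRowPre, pvRowPre, PySem.List.pyRange_one_succ_right hs1, List.map_append]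
      rfl
    have h2 : (pvBodyT n m (g, group) s).2 = group ++ [pvRname m s] := by
      rw [pvBodyT]
      split <;> rfl
    have happ := ih (s+1) (pvBodyT n m (g, group) s).1 (pvBodyT n m (g, group) s).2
      (by omega) (by omega) (by omega)
      (by
        show (pvBodyT n m (g, group) s).1.items = _
        rw [pvBodyT]
        simp only [hslice]
        rw [if_neg (by rw [hlen]; simp)]
        simp only []
        rw [hstep]
        rw [List.append_assoc, List.append_assoc, hrow]
        simp [List.append_assoc])
      (by
        rw [h2, hgroup, PySem.List.pyRange_one_succ_right hs1, List.map_append]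
        rfl)
    exact happ

def pvBodyI (n : Int)
    (st : PySem.Dict String (PySem.Set String) × PySem.Dict Int (List String)) (i : Int) :
    PySem.Dict String (PySem.Set String) × PySem.Dict Int (List String) :=
  let cnt := PySem.Int.floordiv n i
  let inner := (PySem.List.pyRange 0 cnt).foldl (pvBodyT n i) (st.1, ([] : List String))
  (inner.1, st.2.insert i inner.2)

lemma pv_fold_i (n : Int) (hn : 2 ≤ n) :
    ∀ (k : Nat) (m : Int) (g : PySem.Dict String (PySem.Set String))
      (rg : PySem.Dict Int (List String)),
    (n + 1 - m).toNat = k → 2 ≤ m → m ≤ n + 1 →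
    g.items = pvLeft0 n m ++ pvRight n m →
    rg.items = pvRG n m →
    ((PySem.List.pyRange m (n+1)).foldl (pvBodyI n) (g, rg)).1.items
        = pvLeft0 n (n+1) ++ pvRight n (n+1)
      ∧ ((PySem.List.pyRange m (n+1)).foldl (pvBodyI n) (g, rg)).2.items = pvRG n (n+1) := by
  intro k
  induction k with
  | zero =>
    intro m g rg hk hm1 hm2 hg hrg
    have hm : m = n + 1 := by omega
    subst hm
    rw [PySem.List.pyRange_one_eq_nil (le_refl _), List.foldl_nil]
    exact ⟨hg, hrg⟩
  | succ k ih =>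
    intro m g rg hk hm1 hm2 hg hrg
    have hmlt : m < n + 1 := by omega
    rw [PySem.List.pyRange_one_cons hmlt, List.foldl_cons]
    have hcnt0 : 0 ≤ PySem.Int.floordiv n m := pv_cnt_nonneg (by omega) (by omega)
    have ht := pv_fold_t n m hm1 (PySem.Int.floordiv n m).toNat 0 g []
      (by omega) (le_refl _) hcnt0
      (by
        rw [hg, zero_mul, pv_left_zero, pvRowPre, PySem.List.pyRange_one_eq_nil (le_refl _),
          List.map_nil, List.append_nil])
      (by rw [PySem.List.pyRange_one_eq_nil (le_refl _), List.map_nil])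
    have hinner1 : ((PySem.List.pyRange 0 (PySem.Int.floordiv n m)).foldl (pvBodyT n m)
        (g, ([] : List String))).1.items = pvLeft0 n (m+1) ++ pvRight n (m+1) := by
      rw [ht.1, pv_left_end n m hm1]
      have hrr : pvRowPre m (PySem.Int.floordiv n m) = pvRow n m := rfl
      rw [hrr, pvRight, pvRight, PySem.List.pyRange_one_succ_right (show (2:Int) ≤ m by omega),
        List.flatMap_append]
      simp [List.append_assoc]
    have hrgfresh : rg.contains m = false := pv_contains_false rg m (by
      intro p hp
      rw [hrg] at hp
      obtain ⟨i, hi, rfl⟩ := List.mem_map.mp hp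
      have := PySem.List.mem_pyRange_one.mp hi
      simp only
      omega)
    have hrgitems : (rg.insert m (((PySem.List.pyRange 0 (PySem.Int.floordiv n m)).foldl
          (pvBodyT n m) (g, ([] : List String))).2)).items = pvRG n (m+1) := by
      rw [PySem.Dict.items_insert_of_not_contains _ _ hrgfresh, hrg, ht.2, pvRG, pvRG,
        PySem.List.pyRange_one_succ_right (show (2:Int) ≤ m by omega), List.map_append]
      rfl
    have happ := ih (m+1) (pvBodyI n (g, rg) m).1 (pvBodyI n (g, rg) m).2
      (by omega) (by omega) (by omega)
      (by show ((PySem.List.pyRange 0 (PySem.Int.floordiv n m)).foldl (pvBodyT n m)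
            (g, ([] : List String))).1.items = _
          exact hinner1)
      (by show (rg.insert m (((PySem.List.pyRange 0 (PySem.Int.floordiv n m)).foldl
            (pvBodyT n m) (g, ([] : List String))).2)).items = _
          exact hrgitems)
    exact happ

-- initial touch loop of A
lemma pv_fold_touch : ∀ (us : List String) (d : PySem.Dict String (PySem.Set String)),
    (∀ u ∈ us, ∀ p ∈ d.items, p.1 ≠ u) → us.Nodup →
    ((us.foldl (fun g u => g.modify u PySem.Set.empty id) d)).items
      = d.items ++ us.map (fun u => (u, ([] : List String))) := by
  intro us
  induction us with
  | nil => intro d _ _; simp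
  | cons u us ih =>
    intro d hfresh hnd
    rw [List.foldl_cons]
    have habs : (d.modify u PySem.Set.empty id).items = d.items ++ [(u, ([] : List String))] :=
      pv_modify_absent d u PySem.Set.empty id (fun p hp => hfresh u (by simp) p hp)
    rw [ih (d.modify u PySem.Set.empty id) (by
        intro u' hu' p hp
        rw [habs] at hp
        rcases List.mem_append.mp hp with hp' | hp'
        · exact hfresh u' (by simp [hu']) p hp'
        · simp only [List.mem_singleton] at hp'
          subst hp'
          simp only [List.nodup_cons] at hnd
          intro hcon
          have hueq : u = u' := hcon
          subst hueq
          exact hnd.1 hu')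
      (List.nodup_cons.mp hnd).2, habs]
    simp

lemma pv_lnames_nodup (a b : Int) (ha : 0 ≤ a) :
    (((PySem.List.pyRange a b).map (fun j => pvLname j)).Nodup) := by
  apply List.Nodup.map_on
  · intro x hx y hy hxy
    obtain ⟨hx1, _⟩ := PySem.List.mem_pyRange_one.mp hx
    obtain ⟨hy1, _⟩ := PySem.List.mem_pyRange_one.mp hy
    exact pv_Lname_inj (by omega) (by omega) hxy
  · exact PySem.List.nodup_pyRange_one a b

lemma pv_leftList_nodup (n m j : Int) (hj : 0 ≤ j) : (pvLeftList n m j).Nodup := by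
  apply List.Nodup.map_on
  · intro x hx y hy hxy
    have hx' := PySem.List.mem_pyRange_one.mp (List.mem_filter.mp hx).1
    have hy' := PySem.List.mem_pyRange_one.mp (List.mem_filter.mp hy).1
    have h1 : 0 ≤ PySem.Int.floordiv j x := pv_cnt_nonneg hj (by omega)
    have h2 : 0 ≤ PySem.Int.floordiv j y := pv_cnt_nonneg hj (by omega)
    exact (pv_Rname_inj (by omega) h1 (by omega) h2 hxy).1
  · exact List.Nodup.filter _ (PySem.List.nodup_pyRange_one 2 m)

lemma pv_left0_key {n m : Int} {p : String × List String} (hp : p ∈ pvLeft0 n m) :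
    ∃ j, 0 ≤ j ∧ j < n ∧ p.1 = pvLname j := by
  obtain ⟨j, hj, rfl⟩ := List.mem_map.mp hp
  obtain ⟨h1, h2⟩ := PySem.List.mem_pyRange_one.mp hj
  exact ⟨j, h1, h2, rfl⟩

lemma pv_right_keys_nodup (n : Int) : ∀ (k : Nat) (m : Int), 2 ≤ m → (m - 2).toNat = k →
    ((pvRight n m).map Prod.fst).Nodup := by
  intro k
  induction k with
  | zero =>
    intro m hm hk
    have : m = 2 := by omega
    subst this
    rw [pvRight, PySem.List.pyRange_one_eq_nil (le_refl _)]
    simp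
  | succ k ih =>
    intro m hm hk
    have hm2 : 2 < m := by omega
    have hsplit : pvRight n m = pvRight n (m-1) ++ pvRow n (m-1) := by
      rw [pvRight, pvRight]
      have : m = (m-1) + 1 := by omega
      rw [this, PySem.List.pyRange_one_succ_right (show (2:Int) ≤ m-1 by omega),
        List.flatMap_append]
      simp
    rw [hsplit, List.map_append, List.nodup_append]
    refine ⟨ih (m-1) (by omega) (by omega), ?_, ?_⟩
    · rw [pvRow, List.map_map]
      apply List.Nodup.map_on
      · intro x hx y hy hxy
        obtain ⟨hx1, _⟩ := PySem.List.mem_pyRange_one.mp hx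
        obtain ⟨hy1, _⟩ := PySem.List.mem_pyRange_one.mp hy
        simp only [Function.comp] at hxy
        exact (pv_Rname_inj (by omega) hx1 (by omega) hy1 hxy).2
      · exact PySem.List.nodup_pyRange_one _ _
    · intro a ha b hb
      obtain ⟨p, hp, rfl⟩ := List.mem_map.mp ha
      obtain ⟨q, hq, rfl⟩ := List.mem_map.mp hb
      obtain ⟨i, t, hi1, hi2, ht1, hkey⟩ := pv_right_key hp
      obtain ⟨t', ht', rfl⟩ := List.mem_map.mp hq
      obtain ⟨ht1', _⟩ := PySem.List.mem_pyRange_one.mp ht'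
      rw [hkey]
      simp only
      intro hcon
      have := (pv_Rname_inj (by omega) ht1 (by omega) ht1' hcon).1
      omega

lemma pv_left0_keys (n m : Int) :
    (pvLeft0 n m).map Prod.fst = (PySem.List.pyRange 0 n).map (fun j => pvLname j) := by
  rw [pvLeft0, List.map_map]
  rfl

lemma pv_B_left (n : Int) :
    (PySem.List.pyRange 0 n).map (fun j =>
        (pvLname j,
         PySem.Set.ofList (((PySem.List.pyRange 2 (n+1)).filter
             (fun i => decide (PySem.Int.floordiv j i < PySem.Int.floordiv n i))).map
           (fun i => pvRname i (PySem.Int.floordiv j i)))))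
      = pvLeft0 n (n+1) := by
  apply List.map_congr_left
  intro j hj
  obtain ⟨hj1, _⟩ := PySem.List.mem_pyRange_one.mp hj
  have hnod := PySem.Set.ofList_eq_self_of_nodup _ (pv_leftList_nodup n (n+1) j hj1)
  rw [pvLeftList] at hnod
  rw [hnod]
  rfl

lemma pv_B_right (n : Int) :
    (PySem.List.pyRange 2 (n+1)).flatMap (fun i =>
        (PySem.List.pyRange 0 (PySem.Int.floordiv n i)).map (fun t =>
          (pvRname i t, PySem.Set.ofList (PySem.List.slice
            ((PySem.List.pyRange 0 n).map (fun j => pvLname j))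
            (some (t*i)) (some ((t+1)*i))))))
      = pvRight n (n+1) := by
  rw [pvRight, List.flatMap_def, List.flatMap_def]
  congr 1
  apply List.map_congr_left
  intro i hi
  obtain ⟨hi1, hi2⟩ := PySem.List.mem_pyRange_one.mp hi
  rw [pvRow]
  apply List.map_congr_left
  intro t ht
  obtain ⟨ht1, ht2⟩ := PySem.List.mem_pyRange_one.mp ht
  have hi0 : (0:Int) < i := by omega
  have h1 : 0 ≤ t * i := mul_nonneg ht1 (by omega)
  have h2 : t * i ≤ (t+1) * i := mul_le_mul_of_nonneg_right (by omega) (by omega)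
  have h3 : (t+1) * i ≤ PySem.Int.floordiv n i * i :=
    mul_le_mul_of_nonneg_right (by omega) (by omega)
  have h4 : (t+1) * i ≤ n := le_trans h3 (pv_cnt_mul_le hi0)
  have h5 : PySem.Set.ofList (pvBlock (t*i) ((t+1)*i)) = pvBlock (t*i) ((t+1)*i) :=
    PySem.Set.ofList_eq_self_of_nodup _ (pv_lnames_nodup (t*i) ((t+1)*i) h1)
  rw [pv_slice n (t*i) ((t+1)*i) h1 h2 h4, h5]

lemma pv_B_graph (n : Int) (hn : 2 ≤ n) :
    ((PySem.Dict.ofList ((PySem.List.pyRange 0 n).map (fun j =>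
        (pvLname j,
         PySem.Set.ofList (((PySem.List.pyRange 2 (n+1)).filter
             (fun i => decide (PySem.Int.floordiv j i < PySem.Int.floordiv n i))).map
           (fun i => pvRname i (PySem.Int.floordiv j i))))))).update
      ((PySem.List.pyRange 2 (n+1)).flatMap (fun i =>
        (PySem.List.pyRange 0 (PySem.Int.floordiv n i)).map (fun t =>
          (pvRname i t, PySem.Set.ofList (PySem.List.slice
            ((PySem.List.pyRange 0 n).map (fun j => pvLname j))
            (some (t*i)) (some ((t+1)*i)))))))).items
      = pvLeft0 n (n+1) ++ pvRight n (n+1) := by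
  rw [pv_B_left n, pv_B_right n]
  have h1 : (PySem.Dict.ofList (pvLeft0 n (n+1))).items = pvLeft0 n (n+1) := by
    rw [PySem.Dict.ofList]
    rw [pv_update_fresh (pvLeft0 n (n+1)) PySem.Dict.empty (by intro p _ q hq; simp [PySem.Dict.empty] at hq)
      (by rw [pv_left0_keys]; exact pv_lnames_nodup 0 n (le_refl _))]
    rfl
  rw [pv_update_fresh (pvRight n (n+1)) _ (by
      intro p hp q hq
      rw [h1] at hq
      obtain ⟨i, t, _, _, _, hkey⟩ := pv_right_key hp
      obtain ⟨j, _, _, hkey'⟩ := pv_left0_key hq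
      rw [hkey, hkey']
      exact pv_Lname_ne_Rname j i t)
    (pv_right_keys_nodup n (n+1-2).toNat (n+1) (by omega) (by omega)), h1]

lemma pv_B_rg (n : Int) :
    (PySem.Dict.ofList ((PySem.List.pyRange 2 (n+1)).map (fun i =>
        (i, (PySem.List.pyRange 0 (PySem.Int.floordiv n i)).map (fun t => pvRname i t))))).items
      = pvRG n (n+1) := by
  rw [PySem.Dict.ofList, pv_update_fresh _ PySem.Dict.empty
    (by intro p _ q hq; simp [PySem.Dict.empty] at hq)
    (by
      rw [List.map_map]
      have : (Prod.fst ∘ fun i : Int =>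
          (i, (PySem.List.pyRange 0 (PySem.Int.floordiv n i)).map (fun t => pvRname i t)))
          = fun i => i := rfl
      rw [this]
      simp [PySem.List.nodup_pyRange_one])]
  rfl

-- ===== VERDICT (by name: the statement is the Claim_ definition above) =====
theorem generate_greedy_bad_vertex_cover_instance_spec : Claim_equal_generate_greedy_bad_vertex_cover_instance := by
  intro n _ hpre
  have hn : (2:Int) ≤ n := hpre
  show generate_greedy_bad_vertex_cover_instance n
      = generate_greedy_bad_vertex_cover_instance_alt n
  unfold generate_greedy_bad_vertex_cover_instance generate_greedy_bad_vertex_cover_instance_alt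
  rw [if_neg (show ¬ n < 2 by omega), if_neg (show ¬ n < 2 by omega)]
  show (((PySem.List.pyRange 2 (n+1)).foldl (pvBodyI n)
        ((((PySem.List.pyRange 0 n).map (fun j => pvLname j)).foldl
            (fun g u => g.modify u PySem.Set.empty id) PySem.Dict.empty),
          (PySem.Dict.empty : PySem.Dict Int (List String)))).1.items,
      (PySem.List.pyRange 0 n).map (fun j => pvLname j),
      ((PySem.List.pyRange 2 (n+1)).foldl (pvBodyI n)
        ((((PySem.List.pyRange 0 n).map (fun j => pvLname j)).foldl
            (fun g u => g.modify u PySem.Set.empty id) PySem.Dict.empty),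
          (PySem.Dict.empty : PySem.Dict Int (List String)))).2.items)
    = _
  have hinit : ((((PySem.List.pyRange 0 n).map (fun j => pvLname j)).foldl
      (fun g u => g.modify u PySem.Set.empty id) PySem.Dict.empty)).items
      = pvLeft0 n 2 ++ pvRight n 2 := by
    rw [pv_fold_touch _ _ (by intro u _ p hp; simp [PySem.Dict.empty] at hp)
      (pv_lnames_nodup 0 n (le_refl _))]
    have h0 : (PySem.Dict.empty : PySem.Dict String (PySem.Set String)).items = [] := rfl
    rw [h0, List.nil_append, List.map_map, pvRight,
      PySem.List.pyRange_one_eq_nil (le_refl _), List.flatMap_nil, List.append_nil]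
    apply List.map_congr_left
    intro j hj
    have hll : pvLeftList n 2 j = [] := by
      rw [pvLeftList, PySem.List.pyRange_one_eq_nil (le_refl _)]
      rfl
    simp [hll]
  have hrg0 : (PySem.Dict.empty : PySem.Dict Int (List String)).items = pvRG n 2 := by
    rw [pvRG, PySem.List.pyRange_one_eq_nil (le_refl _)]
    rfl
  have hfold := pv_fold_i n hn (n + 1 - 2).toNat 2 _ _ (by omega) (le_refl _) (by omega)
    hinit hrg0
  simp only [Prod.mk.injEq]
  refine ⟨?_, trivial, ?_⟩
  · rw [hfold.1]
    exact (pv_B_graph n hn).symm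
  · rw [hfold.2]
    exact (pv_B_rg n).symm
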